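-- pv_equiv track=rewrite | github.com/jerrycui2007/CCC-Solutions | 2003/J4S2 Poetry.py | last_syllable
-- ===== SOURCE A (Python) =====
-- def last_syllable(string):
--     last_word = string.split()[-1]
--     contains_vowel = False
--     for char in ("A", "E", "I", "O", "U"):
--         if char in last_word:
--             contains_vowel = True
--
--     if not contains_vowel:
--         return last_word
--     else:
--         letters_reversed = []
--         for i in range(len(last_word) - 1, -1, -1):
--             if last_word[i] in ("A", "E", "I", "O", "U"):
--                 letters_reversed.append(last_word[i])
--                 letters_reversed.reverse()
--                 syllable = ""
--                 for char in letters_reversed: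
--                     syllable += char
--                 return syllable
--             else:
--                 letters_reversed.append(last_word[i])
-- ===== SOURCE B (Python) =====
-- def last_syllable(string):
--     last_word = string.split()[-1]
--     idx = max(last_word.rfind(v) for v in "AEIOU")
--     return last_word if idx == -1 else last_word[idx:]
-- ===== Notes on version B (the rewrite author's own statement) =====
-- stated objective: simpler
-- what changed: Replaces A's separate vowel-containment loop, backward index loop with an accumulator list, reverse and character-by-character string rebuild by a single positional search (max of rfind over the five vowels) followed by one slice.
import Mathlib
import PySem

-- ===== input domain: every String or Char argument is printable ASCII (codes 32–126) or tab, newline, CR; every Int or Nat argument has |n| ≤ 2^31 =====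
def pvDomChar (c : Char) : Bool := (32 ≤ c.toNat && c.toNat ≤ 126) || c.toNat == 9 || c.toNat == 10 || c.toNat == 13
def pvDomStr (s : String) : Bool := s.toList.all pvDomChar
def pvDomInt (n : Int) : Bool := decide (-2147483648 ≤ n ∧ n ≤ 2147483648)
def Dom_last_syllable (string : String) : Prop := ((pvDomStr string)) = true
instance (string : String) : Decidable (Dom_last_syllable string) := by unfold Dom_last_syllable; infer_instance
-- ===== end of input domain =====

-- B replaces A's vowel-containment loop + backward index loop + reverse/rebuild by
-- max-of-rfind over the five vowels followed by a single slice (simpler decomposition).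


-- ===== PORT A =====
def pvVowels : List Char := ['A', 'E', 'I', 'O', 'U']

-- the `for char in ("A","E","I","O","U"): if char in last_word: contains_vowel = True` loop
def pvContainsLoop (lw : List Char) : List Char → Bool → Bool
  | [], b => b
  | c :: rest, b => pvContainsLoop lw rest (if PySem.Chars.isIn [c] lw then true else b)

-- the `for i in range(len(last_word)-1, -1, -1): …` loop with its early return;
-- `none` = the loop fell through (Python would return None) or an index error (both unreachable here)
def pvLoopA (lw : List Char) : List Int → List Char → Option (List Char)
  | [], _ => none
  | i :: rest, acc =>
    match PySem.List.pyGet? lw i with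
    | none => none
    | some c =>
      if c ∈ pvVowels then
        some ((acc ++ [c]).reverse)   -- append, reverse, then join char by char
      else
        pvLoopA lw rest (acc ++ [c])

def last_syllable (string : String) : String :=
  match PySem.List.pyGet? (PySem.Str.split₀ string) (-1) with
  | none => ""   -- IndexError on whitespace-only input: excluded by Pre_
  | some last_word =>
    let lw := last_word.toList
    let contains_vowel := pvContainsLoop lw pvVowels false
    if contains_vowel = false then last_word
    else
      match pvLoopA lw (PySem.List.pyRange ((lw.length : Int) - 1) (-1) (-1)) [] with
      | some syl => String.ofList syl
      | none => ""   -- loop fell through: unreachable since a vowel is present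

-- ===== PORT B =====
def last_syllable_alt (string : String) : String :=
  match PySem.List.pyGet? (PySem.Str.split₀ string) (-1) with
  | none => ""   -- IndexError on whitespace-only input: excluded by Pre_
  | some last_word =>
    match PySem.List.max? (pvVowels.map (fun v => PySem.Chars.rfind last_word.toList [v])) id with
    | none => ""   -- max() of an empty sequence: unreachable (five vowels)
    | some idx =>
      if idx = -1 then last_word
      else String.ofList (PySem.Chars.slice last_word.toList (some idx) none)

-- ===== PRECONDITION & SPEC =====
-- Pre_ excludes whitespace-only strings, on which string.split() is empty and A raises IndexError.
def Pre_last_syllable (string : String) : Prop := PySem.Str.split₀ string ≠ []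
instance (string : String) : Decidable (Pre_last_syllable string) := by unfold Pre_last_syllable; infer_instance
def pvWitness_last_syllable : String := "cODe"

def Spec_last_syllable (string : String) (out : String) : Prop := out = last_syllable_alt string
instance (string : String) (out : String) : Decidable (Spec_last_syllable string out) := by unfold Spec_last_syllable; infer_instance

-- ===== CLAIM (what is proved, stated in full; the proofs are below) =====
def Claim_equal_last_syllable : Prop := ∀ (string : String), Dom_last_syllable string → Pre_last_syllable string → Spec_last_syllable string (last_syllable string)

-- ===== LEMMAS AND PROOFS =====

-- greatest j < k with lw[j] a vowel (proof-side characterisation of both programs)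
def pvLastV (lw : List Char) : Nat → Option Nat
  | 0 => none
  | k+1 =>
    match lw[k]? with
    | some c => if c ∈ pvVowels then some k else pvLastV lw k
    | none => pvLastV lw k

-- greatest j < k with lw[j] = v
def pvLastOcc (v : Char) (lw : List Char) : Nat → Option Nat
  | 0 => none
  | k+1 => if lw[k]? = some v then some k else pvLastOcc v lw k

lemma pvContainsLoop_eq (lw : List Char) (vs : List Char) (b : Bool) :
    pvContainsLoop lw vs b = (b || vs.any (fun v => decide (v ∈ lw))) := by
  induction vs generalizing b with
  | nil => simp [pvContainsLoop]
  | cons c rest ih =>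
    simp only [pvContainsLoop, ih, List.any_cons]
    by_cases h : c ∈ lw
    · simp [PySem.Chars.isIn_iff_infix, List.singleton_infix_iff, h]
    · simp [PySem.Chars.isIn_iff_infix, List.singleton_infix_iff, h]

lemma pvRangeDown (k : Nat) :
    PySem.List.pyRange ((k : Int) - 1) (-1) (-1)
      = (List.range k).map (fun i : Nat => (k : Int) - 1 - (i : Int)) := by
  unfold PySem.List.pyRange
  rw [if_neg (by norm_num)]
  cases k with
  | zero => norm_num
  | succ k =>
    rw [if_neg (by norm_num), if_pos (by push_cast; omega)]
    have hc : ((((k + 1 : Nat) : Int) - 1 - -1 + -(-1) - 1) / -(-1)).toNat = k + 1 := by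
      push_cast; omega
    rw [hc]
    exact List.map_congr_left (fun i _ => by push_cast; ring)

lemma pvRangeDown_succ (k : Nat) :
    PySem.List.pyRange (((k+1 : Nat) : Int) - 1) (-1) (-1)
      = ((k : Nat) : Int) :: PySem.List.pyRange (((k : Nat) : Int) - 1) (-1) (-1) := by
  rw [pvRangeDown, pvRangeDown, List.range_succ_eq_map, List.map_cons, List.map_map]
  refine congrArg₂ _ (by push_cast; ring) ?_
  exact List.map_congr_left (fun i _ => by simp [Nat.succ_eq_add_one]; ring)

lemma pvLastV_spec_some (lw : List Char) (k : Nat) (j : Nat) (h : pvLastV lw k = some j) :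
    j < k ∧ (∃ c, lw[j]? = some c ∧ c ∈ pvVowels) ∧
      ∀ i, j < i → i < k → ∀ c, lw[i]? = some c → c ∉ pvVowels := by
  induction k with
  | zero => simp [pvLastV] at h
  | succ k ih =>
    simp only [pvLastV] at h
    cases hk : lw[k]? with
    | none =>
      rw [hk] at h
      obtain ⟨h1, h2, h3⟩ := ih h
      exact ⟨Nat.lt_succ_of_lt h1, h2, fun i hji hik c hc => by
        rcases Nat.lt_succ_iff_lt_or_eq.mp hik with h' | h'
        · exact h3 i hji h' c hc
        · subst h'; simp [hk] at hc⟩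
    | some c =>
      rw [hk] at h
      by_cases hv : c ∈ pvVowels
      · simp [hv] at h
        subst h
        exact ⟨Nat.lt_succ_self _, ⟨c, hk, hv⟩, fun i hji hik c' hc' => by omega⟩
      · simp [hv] at h
        obtain ⟨h1, h2, h3⟩ := ih h
        exact ⟨Nat.lt_succ_of_lt h1, h2, fun i hji hik c' hc' => by
          rcases Nat.lt_succ_iff_lt_or_eq.mp hik with h' | h'
          · exact h3 i hji h' c' hc'
          · subst h'; rw [hk] at hc'; cases hc'; exact hv⟩

lemma pvLastV_spec_none (lw : List Char) (k : Nat) (h : pvLastV lw k = none) :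
    ∀ i, i < k → ∀ c, lw[i]? = some c → c ∉ pvVowels := by
  induction k with
  | zero => omega
  | succ k ih =>
    simp only [pvLastV] at h
    intro i hik c hc
    cases hk : lw[k]? with
    | none =>
      rw [hk] at h
      rcases Nat.lt_succ_iff_lt_or_eq.mp hik with h' | h'
      · exact ih h i h' c hc
      · subst h'; simp [hk] at hc
    | some c' =>
      rw [hk] at h
      by_cases hv : c' ∈ pvVowels
      · simp [hv] at h
      · simp [hv] at h
        rcases Nat.lt_succ_iff_lt_or_eq.mp hik with h' | h'
        · exact ih h i h' c hc
        · subst h'; rw [hk] at hc; cases hc; exact hv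

lemma pvLoopA_eq (lw : List Char) (k : Nat) (hk : k ≤ lw.length) :
    pvLoopA lw (PySem.List.pyRange ((k : Int) - 1) (-1) (-1)) ((lw.drop k).reverse)
      = (pvLastV lw k).map (fun j => lw.drop j) := by
  induction k with
  | zero =>
    rw [pvRangeDown]
    simp [pvLoopA, pvLastV]
  | succ k ih =>
    rw [pvRangeDown_succ]
    have hk' : k < lw.length := by omega
    have hg : PySem.List.pyGet? lw ((k : Nat) : Int) = some lw[k] :=
      (PySem.List.pyGet?_natCast lw k).trans (List.getElem?_eq_getElem hk')
    simp only [pvLoopA, hg]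
    have hkq : lw[k]? = some lw[k] := List.getElem?_eq_getElem hk'
    by_cases hv : lw[k] ∈ pvVowels
    · rw [if_pos hv]
      simp only [pvLastV, hkq, if_pos hv]
      rw [List.reverse_append, List.reverse_reverse]
      simp [List.getElem_cons_drop hk']
    · rw [if_neg hv]
      have hacc : (lw.drop (k+1)).reverse ++ [lw[k]] = (lw.drop k).reverse := by
        rw [← List.getElem_cons_drop hk', List.reverse_cons]
      rw [hacc, ih (by omega)]
      simp [pvLastV, hkq, hv]

lemma pvLastOcc_spec_some (v : Char) (lw : List Char) (k : Nat) (j : Nat)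
    (h : pvLastOcc v lw k = some j) :
    j < k ∧ lw[j]? = some v ∧ ∀ i, j < i → i < k → lw[i]? ≠ some v := by
  induction k with
  | zero => simp [pvLastOcc] at h
  | succ k ih =>
    simp only [pvLastOcc] at h
    by_cases hk : lw[k]? = some v
    · simp [hk] at h
      subst h
      exact ⟨Nat.lt_succ_self _, hk, fun i h1 h2 => by omega⟩
    · simp [hk] at h
      obtain ⟨h1, h2, h3⟩ := ih h
      refine ⟨Nat.lt_succ_of_lt h1, h2, fun i hji hik => ?_⟩
      rcases Nat.lt_succ_iff_lt_or_eq.mp hik with h' | h'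
      · exact h3 i hji h'
      · subst h'; exact hk

lemma pvLastOcc_spec_none (v : Char) (lw : List Char) (k : Nat) (h : pvLastOcc v lw k = none) :
    ∀ i, i < k → lw[i]? ≠ some v := by
  induction k with
  | zero => omega
  | succ k ih =>
    simp only [pvLastOcc] at h
    by_cases hk : lw[k]? = some v
    · simp [hk] at h
    · simp [hk] at h
      intro i hik
      rcases Nat.lt_succ_iff_lt_or_eq.mp hik with h' | h'
      · exact ih h i h'
      · subst h'; exact hk

lemma pvLastOcc_exists (v : Char) (lw : List Char) (k : Nat) (j : Nat)
    (hj : j < k) (hc : lw[j]? = some v) :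
    ∃ j', pvLastOcc v lw k = some j' ∧ j ≤ j' := by
  induction k with
  | zero => omega
  | succ k ih =>
    simp only [pvLastOcc]
    by_cases hk : lw[k]? = some v
    · exact ⟨k, by simp [hk], by omega⟩
    · simp only [hk, if_false]
      have : j ≠ k := fun h => by subst h; exact hk hc
      exact ih (by omega)

lemma pvPrefixSingleton (v : Char) (t : List Char) :
    [v].isPrefixOf t = true ↔ t.head? = some v := by
  cases t with
  | nil => simp [List.isPrefixOf]
  | cons a t =>
    simp only [List.isPrefixOf, List.head?_cons, Bool.and_true, beq_iff_eq, Option.some.injEq]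
    exact ⟨fun h => h.symm, fun h => h.symm⟩

lemma pvRfindGo_eq (lw : List Char) (v : Char) (n : Nat) :
    PySem.Chars.rfind.go lw [v] n = (pvLastOcc v lw (n + 1)).elim (-1) (fun j => (j : Int)) := by
  induction n with
  | zero =>
    show (if [v].isPrefixOf lw = true then (0:Int) else -1) = _
    simp only [pvLastOcc]
    have hh : lw.head? = lw[0]? := List.head?_eq_getElem?
    by_cases h : lw[0]? = some v
    · rw [if_pos ((pvPrefixSingleton v lw).mpr (hh.trans h)), if_pos h]; rfl
    · rw [if_neg (fun hp => h (hh ▸ (pvPrefixSingleton v lw).mp hp)), if_neg h]; rfl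
  | succ n ih =>
    show (if [v].isPrefixOf (lw.drop (n+1)) = true then ((n:Int)+1) else PySem.Chars.rfind.go lw [v] n) = _
    simp only [pvLastOcc]
    have hd : (lw.drop (n+1)).head? = lw[n+1]? := List.head?_drop
    by_cases h : lw[n+1]? = some v
    · rw [if_pos ((pvPrefixSingleton v (lw.drop (n+1))).mpr (hd.trans h)), if_pos h]
      simp
    · rw [if_neg (fun hp => h (hd ▸ (pvPrefixSingleton v (lw.drop (n+1))).mp hp)), if_neg h]
      exact ih

lemma pvRfind_eq (lw : List Char) (v : Char) :
    PySem.Chars.rfind lw [v] = (pvLastOcc v lw lw.length).elim (-1) (fun j => (j : Int)) := by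
  show PySem.Chars.rfind.go lw [v] lw.length = _
  rw [pvRfindGo_eq]
  cases hk : pvLastOcc v lw (lw.length + 1) with
  | none =>
    cases hk' : pvLastOcc v lw lw.length with
    | none => rfl
    | some j =>
      obtain ⟨h1, h2, _⟩ := pvLastOcc_spec_some v lw _ _ hk'
      exact absurd h2 (pvLastOcc_spec_none v lw _ hk j (by omega))
  | some j =>
    obtain ⟨h1, h2, _⟩ := pvLastOcc_spec_some v lw _ _ hk
    have hjlen : j < lw.length := by
      by_contra h
      rw [List.getElem?_eq_none (by omega)] at h2
      cases h2
    obtain ⟨j', hj', hle⟩ := pvLastOcc_exists v lw lw.length j hjlen h2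
    obtain ⟨h1', h2', _⟩ := pvLastOcc_spec_some v lw _ _ hj'
    obtain ⟨j2, hj2, hle2⟩ := pvLastOcc_exists v lw (lw.length + 1) j' (by omega) h2'
    rw [hk] at hj2
    cases hj2
    have : j' = j := by omega
    rw [hj', this]

lemma pvMaxSome (xs : List Int) (x : Int) : ∃ m, PySem.List.max? (x :: xs) id = some m := by
  induction xs generalizing x with
  | nil => exact ⟨x, rfl⟩
  | cons y ys ih =>
    obtain ⟨m, hm⟩ := ih (if x < y then y else x)
    refine ⟨m, ?_⟩
    simp only [PySem.List.max?, List.foldl_cons, id_eq] at hm ⊢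
    rcases lt_or_ge x y with h | h
    · rw [if_pos h] at hm ⊢; exact hm
    · rw [if_neg (not_lt.mpr h)] at hm ⊢; exact hm

-- the per-last-word equivalence
lemma pvCore (w : String) :
    (if pvContainsLoop w.toList pvVowels false = false then w
     else
       match pvLoopA w.toList (PySem.List.pyRange ((w.toList.length : Int) - 1) (-1) (-1)) [] with
       | some syl => String.ofList syl
       | none => "")
    = (match PySem.List.max? (pvVowels.map (fun v => PySem.Chars.rfind w.toList [v])) id with
       | none => ""
       | some idx =>
         if idx = -1 then w
         else String.ofList (PySem.Chars.slice w.toList (some idx) none)) := by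
  set lw := w.toList with hlw
  have hnil : ([] : List Char) = (lw.drop lw.length).reverse := by simp
  cases hJ : pvLastV lw lw.length with
  | none =>
    -- no vowel anywhere: A's flag is false, every rfind is -1
    have hno := pvLastV_spec_none lw lw.length hJ
    have hcont : pvContainsLoop lw pvVowels false = false := by
      rw [pvContainsLoop_eq]
      simp only [Bool.false_or, List.any_eq_false, decide_eq_true_eq]
      intro v hv hmem
      obtain ⟨i, hi, hgi⟩ := List.getElem_of_mem hmem
      exact hno i hi v (by rw [List.getElem?_eq_getElem hi, hgi]) hv
    have hf : ∀ v ∈ pvVowels, PySem.Chars.rfind lw [v] = -1 := by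
      intro v hv
      rw [pvRfind_eq]
      cases ho : pvLastOcc v lw lw.length with
      | none => rfl
      | some j =>
        obtain ⟨h1, h2, _⟩ := pvLastOcc_spec_some v lw _ _ ho
        exact absurd hv (hno j h1 v h2)
    rw [List.map_congr_left hf]
    rw [hcont]
    simp [pvVowels, PySem.List.max?]
  | some j =>
    obtain ⟨hjlen, ⟨c0, hc0, hv0⟩, hmax⟩ := pvLastV_spec_some lw lw.length j hJ
    have hjlt : j < lw.length := by
      by_contra h
      rw [List.getElem?_eq_none (by omega)] at hc0
      cases hc0
    -- A's flag is true
    have hcont : pvContainsLoop lw pvVowels false = true := by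
      rw [pvContainsLoop_eq]
      simp only [Bool.false_or, List.any_eq_true, decide_eq_true_eq]
      exact ⟨c0, hv0, List.mem_of_getElem? hc0⟩
    -- A's loop returns the suffix from j
    have hloop := pvLoopA_eq lw lw.length (le_refl _)
    rw [← hnil, hJ] at hloop
    -- each vowel's rfind is at most j, and c0's is exactly j
    have hle : ∀ x ∈ pvVowels.map (fun v => PySem.Chars.rfind lw [v]), x ≤ (j : Int) := by
      intro x hx
      obtain ⟨v, hv, hxv⟩ := List.mem_map.mp hx
      rw [← hxv, pvRfind_eq]
      cases ho : pvLastOcc v lw lw.length with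
      | none => simp
      | some j2 =>
        obtain ⟨h1, h2, _⟩ := pvLastOcc_spec_some v lw _ _ ho
        simp only [Option.elim_some]
        by_contra h
        have hj2 : j < j2 := by omega
        exact hmax j2 hj2 h1 v h2 hv
    have hc0rf : PySem.Chars.rfind lw [c0] = (j : Int) := by
      rw [pvRfind_eq]
      obtain ⟨j', hj', hlej⟩ := pvLastOcc_exists c0 lw lw.length j hjlt hc0
      obtain ⟨h1, h2, _⟩ := pvLastOcc_spec_some c0 lw _ _ hj'
      have : ¬ j < j' := fun hlt => hmax j' hlt h1 c0 h2 hv0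
      have : j' = j := by omega
      rw [hj', this]
      rfl
    have hjmem : (j : Int) ∈ pvVowels.map (fun v => PySem.Chars.rfind lw [v]) :=
      hc0rf ▸ List.mem_map_of_mem hv0
    -- hence the max is exactly j
    have hmaxeq : PySem.List.max? (pvVowels.map (fun v => PySem.Chars.rfind lw [v])) id = some (j : Int) := by
      obtain ⟨m, hm⟩ := pvMaxSome
        (List.tail (pvVowels.map (fun v => PySem.Chars.rfind lw [v])))
        (List.headD (pvVowels.map (fun v => PySem.Chars.rfind lw [v])) 0)
      have hm' : PySem.List.max? (pvVowels.map (fun v => PySem.Chars.rfind lw [v])) id = some m := by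
        simpa [pvVowels] using hm
      rw [hm']
      have h1 : m ≤ (j : Int) := hle m (PySem.List.max?_mem hm')
      have h2 : (j : Int) ≤ m := PySem.List.max?_isMax hm' _ hjmem
      exact congrArg some (le_antisymm h1 h2)
    have hs : PySem.Chars.slice lw (some (j : Int)) none = lw.drop j := by
      rw [PySem.Chars.slice_eq_listSlice, PySem.List.slice_from lw (by positivity)]
      simp
    rw [hcont, hmaxeq, hloop]
    simp only [Option.map_some, hs, Bool.true_eq_false, if_false]
    rw [if_neg (show ¬((j : Int) = -1) by omega)]

-- ===== VERDICT (by name: the statement is the Claim_ definition above) =====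
theorem last_syllable_spec : Claim_equal_last_syllable := by
  intro s _ hpre
  unfold Spec_last_syllable last_syllable last_syllable_alt
  obtain ⟨w, hw⟩ : ∃ w, PySem.List.pyGet? (PySem.Str.split₀ s) (-1) = some w := by
    cases h : PySem.Str.split₀ s with
    | nil => exact absurd h hpre
    | cons a t => simp [PySem.List.pyGet?, PySem.List.pyIdx?]
  rw [hw]
  exact pvCore w
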